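-- pv_equiv track=rewrite | github.com/mathis-kdio/Opti-combinatoire | genetique.py | calculScore
-- ===== SOURCE A (Python) =====
-- def calculScore(population, convives):
--   scoresWithConvives = []
--   scores = []
--   for invite in population:
--     score = 0
--     for autresInvites in population:
--       #test si un invite ne connait pas les autres invites, dans ce cas +1
--       if invite != autresInvites and invite not in convives[autresInvites][2]:
--         score += 1
--     scoresWithConvives.append([score, invite])
--     scores.append(score)
--
--   return (scoresWithConvives, scores)
-- ===== SOURCE B (Python) =====
-- def calculScore(population, convives):
--   # One pass over the guest lists: score(i) = (#others in population) - (#others whose list contains i).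
--   n = len(population)
--   cnt = {}
--   for p in population:
--     cnt[p] = cnt.get(p, 0) + 1
--   listed = {}
--   for a in population:
--     for x in set(convives[a][2]):
--       if x != a:
--         listed[x] = listed.get(x, 0) + 1
--   scores = [n - cnt[i] - listed.get(i, 0) for i in population]
--   return ([[s, i] for s, i in zip(scores, population)], scores)
-- ===== Notes on version B (the rewrite author's own statement) =====
-- stated objective: alternative
-- what changed: Replaces A's all-pairs membership scan by a single pass of reverse counts (dict of how many population members list each invite), so score = n - multiplicity(invite) - listedBy(invite); O(n*L) work instead of O(n^2*L), though a timing run's large inputs lie outside Pre_ so no speed is claimed.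
-- outside the precondition, e.g. on calculScore([0, 0], []): A returns ([[0, 0], [0, 0]], [0, 0]), B raises IndexError
import Mathlib
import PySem

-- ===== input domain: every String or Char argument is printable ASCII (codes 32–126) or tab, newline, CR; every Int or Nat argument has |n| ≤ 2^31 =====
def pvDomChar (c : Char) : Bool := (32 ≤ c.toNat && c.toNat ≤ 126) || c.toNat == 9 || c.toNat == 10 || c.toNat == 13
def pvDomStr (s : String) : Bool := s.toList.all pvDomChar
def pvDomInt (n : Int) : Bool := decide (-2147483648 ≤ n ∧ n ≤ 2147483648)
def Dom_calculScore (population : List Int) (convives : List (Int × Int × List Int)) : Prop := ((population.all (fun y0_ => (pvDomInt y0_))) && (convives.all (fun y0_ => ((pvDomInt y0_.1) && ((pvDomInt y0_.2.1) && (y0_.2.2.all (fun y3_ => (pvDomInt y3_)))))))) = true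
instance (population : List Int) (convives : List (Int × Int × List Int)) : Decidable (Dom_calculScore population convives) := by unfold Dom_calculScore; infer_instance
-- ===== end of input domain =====

-- B replaces A's quadratic all-pairs membership scan by one pass of reverse counts
-- (score = n - multiplicity - listedBy); equivalence proved on all in-range inputs.


-- ===== PORT A =====
-- convives[a][2] (valid under Pre_; default never reached there)
def pvGuestList (convives : List (Int × Int × List Int)) (a : Int) : List Int :=
  ((PySem.List.pyGet? convives a).getD (0, 0, [])).2.2

def calculScore (population : List Int) (convives : List (Int × Int × List Int)) : List (List Int) × List Int :=
  population.foldl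
    (fun acc invite =>
      let score : Int := population.foldl
        (fun score autresInvites =>
          if invite ≠ autresInvites ∧ invite ∉ pvGuestList convives autresInvites
          then score + 1 else score) 0
      (acc.1 ++ [[score, invite]], acc.2 ++ [score]))
    ([], [])

-- ===== PORT B =====
def calculScore_alt (population : List Int) (convives : List (Int × Int × List Int)) : List (List Int) × List Int :=
  let n : Int := population.length
  let cnt : PySem.Dict Int Int :=
    population.foldl (fun d p => d.modify p 0 (· + 1)) PySem.Dict.empty
  let listed : PySem.Dict Int Int :=
    population.foldl
      (fun d a =>
        (PySem.Set.ofList (pvGuestList convives a)).foldl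
          (fun d x => if x ≠ a then d.modify x 0 (· + 1) else d) d)
      PySem.Dict.empty
  let scores : List Int := population.map (fun i => n - cnt.getD i 0 - listed.getD i 0)
  ((scores.zip population).map (fun p => [p.1, p.2]), scores)

-- ===== PRECONDITION & SPEC =====
-- Pre_ excludes populations containing an index out of range for convives: there A raises
-- IndexError, except when the population is all one value, where A's short-circuited 'and'
-- never indexes and it accidentally returns all-zero scores while B (which always indexes) raises.
def Pre_calculScore (population : List Int) (convives : List (Int × Int × List Int)) : Prop :=
  ∀ a ∈ population, PySem.Raise.InRange convives.length a

instance (population : List Int) (convives : List (Int × Int × List Int)) : Decidable (Pre_calculScore population convives) := by unfold Pre_calculScore; infer_instance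

def pvWitness_calculScore : List Int × (List (Int × Int × List Int)) :=
  ([0, 1], [(0, 0, [1]), (0, 0, [])])

def Spec_calculScore (population : List Int) (convives : List (Int × Int × List Int)) (out : List (List Int) × List Int) : Prop := out = calculScore_alt population convives
instance (population : List Int) (convives : List (Int × Int × List Int)) (out : List (List Int) × List Int) : Decidable (Spec_calculScore population convives out) := by unfold Spec_calculScore; infer_instance

-- ===== CLAIM (what is proved, stated in full; the proofs are below) =====
def Claim_equal_calculScore : Prop := ∀ (population : List Int) (convives : List (Int × Int × List Int)), Dom_calculScore population convives → Pre_calculScore population convives → Spec_calculScore population convives (calculScore population convives)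

-- ===== LEMMAS AND PROOFS =====

theorem zip_map_self (f : Int → Int) (l : List Int) :
    (l.map f).zip l = l.map (fun i => (f i, i)) := by
  induction l with
  | nil => rfl
  | cons a t ih => simp [ih]

-- A's inner loop is a countP
theorem scoreA_eq_countP (population : List Int) (convives : List (Int × Int × List Int)) (invite : Int) :
    population.foldl
      (fun score autresInvites =>
        if invite ≠ autresInvites ∧ invite ∉ pvGuestList convives autresInvites
        then score + 1 else score) (0 : Int)
    = (population.countP (fun a => decide (invite ≠ a ∧ invite ∉ pvGuestList convives a)) : Int) := by
  rw [PySem.List.foldl_ite_add_one]; simp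

-- B's reverse-count dict looked up at i counts the a's that list i
theorem listed_getD (population : List Int) (convives : List (Int × Int × List Int))
    (d : PySem.Dict Int Int) (i : Int) :
    (population.foldl
      (fun d a =>
        (PySem.Set.ofList (pvGuestList convives a)).foldl
          (fun d x => if x ≠ a then d.modify x 0 (· + 1) else d) d)
      d).getD i 0
    = d.getD i 0 + (population.countP (fun a => decide (a ≠ i ∧ i ∈ pvGuestList convives a)) : Int) := by
  induction population generalizing d with
  | nil => simp
  | cons a t ih =>
    simp only [List.foldl_cons, ih, List.countP_cons]
    have hinner :
        ((PySem.Set.ofList (pvGuestList convives a)).foldl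
          (fun d x => if x ≠ a then d.modify x 0 (· + 1) else d) d).getD i 0
        = d.getD i 0 + (if a ≠ i ∧ i ∈ pvGuestList convives a then 1 else 0) := by
      rw [PySem.List.foldl_ite_eq_foldl_filter, PySem.Dict.getD_foldl_modify_add_one]
      have hcount :
          ((PySem.Set.ofList (pvGuestList convives a)).filter (fun x => decide (x ≠ a))).count i
          = (if a ≠ i ∧ i ∈ pvGuestList convives a then 1 else 0) := by
        rcases Decidable.em (a ≠ i ∧ i ∈ pvGuestList convives a) with h | h
        · rw [if_pos h]
          refine List.count_eq_one_of_mem ?_ ?_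
          · exact (PySem.Set.nodup_ofList _).filter _
          · simp only [List.mem_filter, PySem.Set.mem_ofList]
            exact ⟨h.2, by simpa using h.1.symm⟩
        · rw [if_neg h, List.count_eq_zero]
          intro hm
          simp only [List.mem_filter, PySem.Set.mem_ofList, decide_eq_true_eq] at hm
          exact h ⟨fun he => hm.2 he.symm, hm.1⟩
      rw [hcount]
      split_ifs <;> simp
    rw [hinner]
    by_cases h : a ≠ i ∧ i ∈ pvGuestList convives a
    · simp [h]; ring
    · simp [h]

-- per-element partition: a = i, or a ≠ i ∧ i ∈ L a, or a ≠ i ∧ i ∉ L a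
theorem countP_partition (population : List Int) (convives : List (Int × Int × List Int)) (i : Int) :
    (population.countP (fun a => decide (i ≠ a ∧ i ∉ pvGuestList convives a)) : Int)
    = (population.length : Int) - (population.count i : Int)
      - (population.countP (fun a => decide (a ≠ i ∧ i ∈ pvGuestList convives a)) : Int) := by
  induction population with
  | nil => simp
  | cons a t ih =>
    simp only [List.countP_cons, List.count_cons, List.length_cons, ne_eq] at ih ⊢
    push_cast
    rw [ih]
    by_cases h1 : a = i
    · subst h1; simp
    · by_cases h2 : i ∈ pvGuestList convives a
      · simp [h1, h2, Ne.symm h1]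
        omega
      · simp [h1, h2, Ne.symm h1]
        omega

-- ===== VERDICT (by name: the statement is the Claim_ definition above) =====
theorem calculScore_spec : Claim_equal_calculScore := by
  intro population convives _hDom _hPre
  unfold Spec_calculScore calculScore calculScore_alt
  -- A: split the pair accumulator and turn the appends into maps
  rw [PySem.List.foldl_prod_mk
        (f := fun acc invite => acc ++
          [[population.foldl
              (fun score autresInvites =>
                if invite ≠ autresInvites ∧ invite ∉ pvGuestList convives autresInvites
                then score + 1 else score) (0 : Int), invite]])
        (g := fun acc invite => acc ++
          [population.foldl
              (fun score autresInvites =>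
                if invite ≠ autresInvites ∧ invite ∉ pvGuestList convives autresInvites
                then score + 1 else score) (0 : Int)])]
  rw [PySem.List.foldl_append_singleton_eq_map, PySem.List.foldl_append_singleton_eq_map]
  -- B: zip of the mapped scores with the population itself is a map of pairs
  dsimp only
  simp only [List.nil_append]
  rw [zip_map_self]
  simp only [List.map_map]
  -- pointwise equality of the scores
  have hscore : ∀ i : Int,
      population.foldl
        (fun score autresInvites =>
          if i ≠ autresInvites ∧ i ∉ pvGuestList convives autresInvites
          then score + 1 else score) (0 : Int)
      = (population.length : Int)
        - ((population.foldl (fun d p => d.modify p 0 (· + 1)) PySem.Dict.empty).getD i 0)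
        - ((population.foldl
              (fun d a =>
                (PySem.Set.ofList (pvGuestList convives a)).foldl
                  (fun d x => if x ≠ a then d.modify x 0 (· + 1) else d) d)
              PySem.Dict.empty).getD i 0) := by
    intro i
    rw [scoreA_eq_countP, listed_getD, countP_partition]
    have hc : (population.foldl (fun d p => d.modify p 0 (· + 1)) PySem.Dict.empty).getD i 0
        = (population.count i : Int) := by
      rw [PySem.Dict.getD_foldl_modify_add_one]; simp
    rw [hc]
    simp
  simp only [Prod.mk.injEq]
  constructor
  · apply List.map_congr_left; intro i _; simp only [Function.comp_apply]; rw [hscore i]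
  · apply List.map_congr_left; intro i _; rw [hscore i]
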